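-- pv_equiv track=rewrite | github.com/ManojKumarPatnaik/practice-alg | Solution/FixTheTable.py | solution
-- ===== SOURCE A (Python) =====
-- def solution(A):
--   """
--   Finds the shortest board length required to cover all the holes.
--
--   Args:
--     A: A list of integers representing the positions of the holes.
--
--   Returns:
--     The shortest board length required to cover all the holes.
--   """
--
--   # Sort the array in ascending order
--   A.sort()
--
--     # Initialize the left and right pointers for binary search
--   left = 1
--   right = A[-1] - A[0]
--
--   # Perform binary search
--   while left < right:
--     mid = (left + right) // 2  # Calculate the middle value
--
--     # Initialize the position of the first board and the board count
--     lastPositionCheck = A[0]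
--     numberBoards = 1
--
--     # Iterate over all holes
--     for i in range(1, len(A)):
--       # If the current hole can't be covered by the current board
--       if A[i] - lastPositionCheck > mid:
--         # Start a new board at this hole
--         lastPositionCheck = A[i]
--         numberBoards += 1  # Increment the board count
--
--         # If more than two boards are needed, break out of the loop
--         if numberBoards > 2:
--           break
--
--     # If it's possible to cover all holes with two boards of length mid
--     if numberBoards > 2:
--       # Continue the search in the upper half of the search space
--       left = mid + 1
--     else:
--       # Continue the search in the lower half of the search space
--       right = mid
--
--   # Return the smallest board length that can cover all holes
--   return left
-- ===== SOURCE B (Python) =====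
-- def solution(A):
--   """Min over split points of max(left span, right span) on the sorted holes,
--   clamped to at least 1 (A sorts its argument in place; B does not mutate it)."""
--   B = sorted(A)
--   n = len(B)
--   if n == 1:
--     return 1
--   best = min(max(B[i] - B[0], B[n - 1] - B[i + 1]) for i in range(n - 1))
--   return max(1, best)
-- ===== Notes on version B (the rewrite author's own statement) =====
-- stated objective: faster
-- what changed: Replaces A's binary search over board lengths with a greedy-feasibility check per probe by a direct single minimum over split points of the sorted holes (max of the two spans), clamped to at least 1.
-- outside the precondition, e.g. on solution([]): A raises IndexError, B raises ValueError
import Mathlib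
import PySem

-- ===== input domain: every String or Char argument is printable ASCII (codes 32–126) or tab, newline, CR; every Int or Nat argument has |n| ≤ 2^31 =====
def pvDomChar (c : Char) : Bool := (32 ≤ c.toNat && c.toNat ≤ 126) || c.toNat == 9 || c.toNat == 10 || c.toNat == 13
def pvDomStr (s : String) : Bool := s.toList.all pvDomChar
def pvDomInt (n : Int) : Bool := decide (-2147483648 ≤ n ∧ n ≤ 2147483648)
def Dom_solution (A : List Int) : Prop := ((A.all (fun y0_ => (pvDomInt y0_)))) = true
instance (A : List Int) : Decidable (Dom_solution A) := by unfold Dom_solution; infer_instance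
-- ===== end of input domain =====

-- B replaces A's binary search over board lengths by a single minimum over split
-- points of the sorted holes (A sorts its argument in place; B does not mutate it:
-- the equivalence proved here is about the return value only).

-- ===== PORT A =====
-- the 'for i in range(1, len(A))' loop: state (lastPositionCheck, numberBoards), early break once numberBoards > 2
def innerA (mid : Int) : List Int → Int → Int → Int
  | [], _, nb => nb
  | x :: xs, last, nb =>
    if x - last > mid then
      if nb + 1 > 2 then nb + 1
      else innerA mid xs x (nb + 1)
    else innerA mid xs last nb

-- the 'while left < right' binary search
def bsearchA (t : List Int) (a0 : Int) (left right : Int) : Int :=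
  if _h : left < right then
    let mid := PySem.Int.floordiv (left + right) 2
    if innerA mid t a0 1 > 2 then bsearchA t a0 (mid + 1) right
    else bsearchA t a0 left mid
  else left
termination_by (right - left).toNat
decreasing_by
  all_goals
    have hm : PySem.Int.floordiv (left + right) 2 = (left + right) / 2 :=
      PySem.Int.floordiv_eq_ediv_of_pos (by norm_num)
    omega

def solution (A : List Int) : Int :=
  let S := PySem.List.sorted A (fun x => x) false
  let a0 := (PySem.List.pyGet? S 0).getD 0        -- A[0]; Pre_ excludes the empty list (IndexError)
  let alast := (PySem.List.pyGet? S (-1)).getD 0  -- A[-1]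
  bsearchA (S.drop 1) a0 1 (alast - a0)

-- ===== PORT B =====
def solution_alt (A : List Int) : Int :=
  let S := PySem.List.sorted A (fun x => x) false
  let n : Int := PySem.List.len S
  if n = 1 then 1
  else
    let vals := (PySem.List.pyRange 0 (n - 1) 1).map (fun i =>
      max ((PySem.List.pyGet? S i).getD 0 - (PySem.List.pyGet? S 0).getD 0)
          ((PySem.List.pyGet? S (n - 1)).getD 0 - (PySem.List.pyGet? S (i + 1)).getD 0))
    let best := (PySem.List.min? vals (fun x => x)).getD 0  -- min(...); Pre_ excludes the empty list (ValueError)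
    max 1 best

-- ===== PRECONDITION & SPEC =====
-- Pre_ excludes only the empty list: A raises IndexError there (A[-1]) and B raises ValueError (min of an empty generator).
def Pre_solution (A : List Int) : Prop := A ≠ []
instance (A : List Int) : Decidable (Pre_solution A) := by unfold Pre_solution; infer_instance
def pvWitness_solution : List Int := [3, 1, 7, 2]

def Spec_solution (A : List Int) (out : Int) : Prop := out = solution_alt A
instance (A : List Int) (out : Int) : Decidable (Spec_solution A out) := by unfold Spec_solution; infer_instance

-- ===== CLAIM (what is proved, stated in full; the proofs are below) =====
def Claim_equal_solution : Prop := ∀ (A : List Int), Dom_solution A → Pre_solution A → Spec_solution A (solution A)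

-- ===== LEMMAS AND PROOFS =====

-- the value of split point k on the sorted list S: board 1 covers S[0..k], board 2 covers S[k+1..]
def valAt (S : List Int) (k : Nat) : Int :=
  max (S.getD k 0 - S.getD 0 0) (S.getD (S.length - 1) 0 - S.getD (k + 1) 0)

-- 'two boards of length mid suffice', phrased over split points
def splitOK (S : List Int) (mid : Int) : Prop :=
  ∃ k : Nat, k + 1 < S.length ∧ valAt S k ≤ mid

-- once numberBoards = 2, the loop stays ≤ 2 iff every remaining hole fits on the second board
theorem innerA_two_le (mid last : Int) (xs : List Int) :
    innerA mid xs last 2 ≤ 2 ↔ ∀ y ∈ xs, y - last ≤ mid := by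
  induction xs with
  | nil => simp [innerA]
  | cons x xs ih =>
    by_cases h : x - last > mid
    · simp only [innerA, if_pos h]
      rw [if_pos (by norm_num : (2:Int) + 1 > 2)]
      apply iff_of_false (by norm_num)
      intro hall
      exact absurd (hall x List.mem_cons_self) (by omega)
    · simp only [innerA, if_neg h, ih, List.mem_cons]
      constructor
      · rintro hall y (rfl | hy)
        · omega
        · exact hall y hy
      · intro hall y hy
        exact hall y (Or.inr hy)

-- full characterisation of the greedy check starting from numberBoards = 1
theorem innerA_one_le (mid a0 : Int) (xs : List Int) :
    innerA mid xs a0 1 ≤ 2 ↔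
      ((∀ x ∈ xs, x - a0 ≤ mid) ∨
        ∃ u w v, xs = u ++ w :: v ∧ (∀ z ∈ u, z - a0 ≤ mid) ∧ mid < w - a0 ∧
          ∀ y ∈ v, y - w ≤ mid) := by
  induction xs with
  | nil => simp [innerA]
  | cons x xs ih =>
    by_cases h : x - a0 > mid
    · simp only [innerA, if_pos h]
      rw [if_neg (by norm_num : ¬ ((1:Int) + 1 > 2)), show (1:Int) + 1 = 2 from by norm_num,
          innerA_two_le]
      constructor
      · intro hv
        exact Or.inr ⟨[], x, xs, rfl, by simp, h, hv⟩
      · rintro (hall | ⟨u, w, v, heq, hu, hw, hv⟩)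
        · exact absurd (hall x List.mem_cons_self) (by omega)
        · cases u with
          | nil =>
            simp only [List.nil_append, List.cons.injEq] at heq
            obtain ⟨rfl, rfl⟩ := heq
            exact hv
          | cons z u' =>
            simp only [List.cons_append, List.cons.injEq] at heq
            obtain ⟨hxz, _⟩ := heq
            subst hxz
            exact absurd (hu x List.mem_cons_self) (by omega)
    · simp only [innerA, if_neg h, ih]
      constructor
      · rintro (hall | ⟨u, w, v, heq, hu, hw, hv⟩)
        · refine Or.inl ?_
          intro y hy
          rcases List.mem_cons.mp hy with rfl | hy
          · omega
          · exact hall y hy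
        · refine Or.inr ⟨x :: u, w, v, by rw [heq]; simp, ?_, hw, hv⟩
          intro z hz
          rcases List.mem_cons.mp hz with rfl | hz
          · omega
          · exact hu z hz
      · rintro (hall | ⟨u, w, v, heq, hu, hw, hv⟩)
        · exact Or.inl (fun y hy => hall y (List.mem_cons_of_mem _ hy))
        · cases u with
          | nil =>
            simp only [List.nil_append, List.cons.injEq] at heq
            obtain ⟨rfl, rfl⟩ := heq
            exact absurd hw h
          | cons z u' =>
            simp only [List.cons_append, List.cons.injEq] at heq
            obtain ⟨hxz, hxs⟩ := heq
            subst hxz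
            exact Or.inr ⟨u', w, v, hxs, fun z hz => hu z (List.mem_cons_of_mem _ hz), hw, hv⟩

-- sortedness, in getD form
theorem sorted_getD_mono {S : List Int} (hp : S.Pairwise (· ≤ ·)) {p q : Nat}
    (hpq : p ≤ q) (hq : q < S.length) : S.getD p 0 ≤ S.getD q 0 := by
  rcases Nat.lt_or_ge p q with hlt | hge
  · rw [List.getD_eq_getElem S 0 (by omega), List.getD_eq_getElem S 0 hq]
    exact List.pairwise_iff_getElem.mp hp p q (by omega) hq hlt
  · have : p = q := by omega
    subst this
    exact le_refl _

theorem mem_le_lastD {S : List Int} (hp : S.Pairwise (· ≤ ·)) {y : Int} (hy : y ∈ S) :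
    y ≤ S.getD (S.length - 1) 0 := by
  obtain ⟨i, hi, rfl⟩ := List.mem_iff_getElem.mp hy
  rw [← List.getD_eq_getElem S 0 hi]
  exact sorted_getD_mono hp (by omega) (by omega)

theorem getD_mem {S : List Int} {k : Nat} (hk : k < S.length) : S.getD k 0 ∈ S := by
  rw [List.getD_eq_getElem S 0 hk]
  exact List.getElem_mem hk

theorem le_length_takeWhile (p : Int → Bool) :
    ∀ (t : List Int) (k : Nat), k ≤ t.length → (∀ j, j < k → p (t.getD j 0) = true) →
      k ≤ (t.takeWhile p).length := by
  intro t
  induction t with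
  | nil => intro k hk _; simpa using hk
  | cons x t ih =>
    intro k hk hall
    cases k with
    | zero => exact Nat.zero_le _
    | succ k =>
      have hx : p x = true := hall 0 (by omega)
      simp only [List.takeWhile_cons, hx, if_true, List.length_cons]
      have := ih k (by simpa using hk) (fun j hj => hall (j + 1) (by omega))
      omega

-- the greedy two-board check equals the split-point formulation, on a sorted list
theorem feas_iff_splitOK (a0 mid : Int) (t : List Int)
    (hp : (a0 :: t).Pairwise (· ≤ ·)) (ht : t ≠ []) (hmid : 0 ≤ mid) :
    innerA mid t a0 1 ≤ 2 ↔ splitOK (a0 :: t) mid := by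
  have hlen : 1 ≤ t.length := List.length_pos_iff.mpr ht
  rw [innerA_one_le]
  constructor
  · rintro (hall | ⟨u, w, v, heq, hu, hw, hv⟩)
    · -- one board covers everything: split before the last hole
      refine ⟨t.length - 1, by simp only [List.length_cons]; omega, ?_⟩
      unfold valAt
      rw [max_le_iff]
      have hL : (a0 :: t).length - 1 = (t.length - 1) + 1 := by
        simp only [List.length_cons]; omega
      constructor
      · have hmem := getD_mem (S := a0 :: t) (k := t.length - 1)
          (by simp only [List.length_cons]; omega)
        rcases List.mem_cons.mp hmem with hEq | hmem'
        · rw [hEq, List.getD_cons_zero]; omega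
        · have := hall _ hmem'
          rw [List.getD_cons_zero]; omega
      · rw [hL]; omega
    · -- split right after the prefix u
      subst heq
      refine ⟨u.length, by simp only [List.length_cons, List.length_append]; omega, ?_⟩
      unfold valAt
      rw [max_le_iff]
      constructor
      · have h1 : (a0 :: (u ++ w :: v)).getD u.length 0 = (a0 :: u).getD u.length 0 := by
          show ((a0 :: u) ++ (w :: v)).getD u.length 0 = _
          exact List.getD_append (a0 :: u) (w :: v) 0 u.length (by simp)
        rw [h1, List.getD_cons_zero]
        have hmem := getD_mem (S := a0 :: u) (k := u.length) (by simp)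
        rcases List.mem_cons.mp hmem with hEq | hmem'
        · rw [hEq]; omega
        · have := hu _ hmem'; omega
      · have h2 : (a0 :: (u ++ w :: v)).getD (u.length + 1) 0 = w := by
          show ((a0 :: u) ++ (w :: v)).getD (u.length + 1) 0 = w
          rw [List.getD_append_right (a0 :: u) (w :: v) 0 (u.length + 1)
            (by simp)]
          simp
        have h3 : (a0 :: (u ++ w :: v)).getD ((a0 :: (u ++ w :: v)).length - 1) 0 ∈ w :: v := by
          show ((a0 :: u) ++ (w :: v)).getD ((a0 :: (u ++ w :: v)).length - 1) 0 ∈ w :: v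
          rw [List.getD_append_right (a0 :: u) (w :: v) 0 _
            (by simp only [List.length_cons, List.length_append]; omega)]
          exact getD_mem (by simp only [List.length_cons, List.length_append]; omega)
        rw [h2]
        rcases List.mem_cons.mp h3 with hEq | hmem'
        · rw [hEq]; omega
        · have := hv _ hmem'; omega
  · rintro ⟨k, hk, hval⟩
    unfold valAt at hval
    simp only [List.length_cons] at hk
    have hd0 : (a0 :: t).getD 0 0 = a0 := List.getD_cons_zero
    rw [hd0] at hval
    by_cases hall : ∀ x ∈ t, x - a0 ≤ mid
    · exact Or.inl hall
    · right
      set p : Int → Bool := fun z => decide (z - a0 ≤ mid) with hpdef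
      have hsplit : t.takeWhile p ++ t.dropWhile p = t := List.takeWhile_append_dropWhile
      have hrestne : t.dropWhile p ≠ [] := by
        intro hnil
        rw [hnil, List.append_nil] at hsplit
        obtain ⟨x, hx2⟩ := not_forall.mp hall
        obtain ⟨hx, hxgt⟩ := Classical.not_imp.mp hx2
        have := List.mem_takeWhile_imp (p := p) (l := t) (by rw [hsplit]; exact hx)
        simp only [hpdef, decide_eq_true_eq] at this
        omega
      obtain ⟨w, v, hrest⟩ : ∃ w v, t.dropWhile p = w :: v := by
        cases hR : t.dropWhile p with
        | nil => exact absurd hR hrestne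
        | cons w v => exact ⟨w, v, rfl⟩
      set u := t.takeWhile p with hudef
      have heq : t = u ++ w :: v := by rw [hudef, ← hrest]; exact hsplit.symm
      have hu : ∀ z ∈ u, z - a0 ≤ mid := by
        intro z hz
        have := List.mem_takeWhile_imp (p := p) (l := t) (hudef ▸ hz)
        simpa [hpdef] using this
      have hwbad : p w = false := by
        have hhd : ∀ (hne : t.dropWhile p ≠ []), (t.dropWhile p).head hne = w := by
          rw [hrest]; intro _; rfl
        have h1 := List.head_dropWhile_not p (l := t) hrestne
        rw [hhd hrestne] at h1
        exact h1
      have hwgt : mid < w - a0 := by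
        simp only [hpdef, decide_eq_false_iff_not] at hwbad
        omega
      refine ⟨u, w, v, heq, hu, hwgt, ?_⟩
      -- k ≤ u.length, because the first k elements of t already satisfy p
      have hku : k ≤ u.length := by
        apply le_length_takeWhile p t k (by omega)
        intro j hj
        rw [hpdef]
        simp only [decide_eq_true_eq]
        rw [show t.getD j 0 = (a0 :: t).getD (j + 1) 0 from (List.getD_cons_succ).symm]
        have hmono : (a0 :: t).getD (j + 1) 0 ≤ (a0 :: t).getD k 0 :=
          sorted_getD_mono hp (by omega) (by simp only [List.length_cons]; omega)
        omega
      have hulen : u.length < t.length := by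
        rw [heq]
        simp only [List.length_append, List.length_cons]
        omega
      -- w sits at index u.length + 1 of a0 :: t, so S[k+1] ≤ w
      have hwidx : (a0 :: t).getD (u.length + 1) 0 = w := by
        rw [List.getD_cons_succ, heq,
          List.getD_append_right u (w :: v) 0 u.length (le_refl _)]
        simp
      have hle_w : (a0 :: t).getD (k + 1) 0 ≤ w := by
        rw [← hwidx]
        exact sorted_getD_mono hp (by omega) (by simp only [List.length_cons]; omega)
      intro y hy
      have hyS : y ∈ a0 :: t := by
        rw [heq]
        exact List.mem_cons_of_mem _ (List.mem_append_right _ (List.mem_cons_of_mem _ hy))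
      have := mem_le_lastD hp hyS
      omega

-- (pyGet? xs i).getD 0 is xs.getD for a nonnegative index
theorem pyGetD0 (S : List Int) {i : Int} (hi : 0 ≤ i) :
    (PySem.List.pyGet? S i).getD 0 = S.getD i.toNat 0 := by
  rw [PySem.List.pyGet?_of_nonneg S hi, ← List.getD_eq_getElem?_getD]

-- B's value list, characterised
theorem mem_valsList {S : List Int} (hn : 2 ≤ S.length) {x : Int} :
    (x ∈ (PySem.List.pyRange 0 ((S.length : Int) - 1) 1).map (fun i =>
        max ((PySem.List.pyGet? S i).getD 0 - (PySem.List.pyGet? S 0).getD 0)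
            ((PySem.List.pyGet? S ((S.length : Int) - 1)).getD 0 -
              (PySem.List.pyGet? S (i + 1)).getD 0))) ↔
      ∃ k : Nat, k + 1 < S.length ∧ x = valAt S k := by
  rw [List.mem_map]
  constructor
  · rintro ⟨i, hi, rfl⟩
    rw [PySem.List.mem_pyRange_one] at hi
    refine ⟨i.toNat, by omega, ?_⟩
    unfold valAt
    rw [pyGetD0 S hi.1, pyGetD0 S (le_refl 0), pyGetD0 S (by omega), pyGetD0 S (by omega)]
    rw [show ((S.length : Int) - 1).toNat = S.length - 1 from by omega,
        show (i + 1).toNat = i.toNat + 1 from by omega,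
        show (0 : Int).toNat = 0 from rfl]
  · rintro ⟨k, hk, rfl⟩
    refine ⟨(k : Int), by rw [PySem.List.mem_pyRange_one]; omega, ?_⟩
    unfold valAt
    rw [pyGetD0 S (by omega), pyGetD0 S (le_refl 0), pyGetD0 S (by omega), pyGetD0 S (by omega)]
    rw [show ((S.length : Int) - 1).toNat = S.length - 1 from by omega,
        show ((k : Int) + 1).toNat = k + 1 from by omega,
        show ((k : Int)).toNat = k from by omega,
        show (0 : Int).toNat = 0 from rfl]

-- the generic binary-search convergence argument
theorem bsearch_conv (t : List Int) (a0 T : Int)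
    (hiff : ∀ mid, 1 ≤ mid → (innerA mid t a0 1 ≤ 2 ↔ T ≤ mid)) :
    ∀ (N : Nat) (l r : Int), (r - l).toNat ≤ N → 1 ≤ l → l ≤ T → T ≤ r →
      bsearchA t a0 l r = T := by
  intro N
  induction N with
  | zero =>
    intro l r hN h1 hlT hTr
    rw [bsearchA]
    rw [dif_neg (by omega : ¬ l < r)]
    omega
  | succ N ih =>
    intro l r hN h1 hlT hTr
    rw [bsearchA]
    by_cases hlr : l < r
    · simp only [dif_pos hlr]
      have hm : PySem.Int.floordiv (l + r) 2 = (l + r) / 2 :=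
        PySem.Int.floordiv_eq_ediv_of_pos (by norm_num)
      set mid := PySem.Int.floordiv (l + r) 2 with hmid
      by_cases hfeas : innerA mid t a0 1 > 2
      · simp only [if_pos hfeas]
        have : ¬ (T ≤ mid) := by
          intro hTm
          have := (hiff mid (by omega)).mpr hTm
          omega
        exact ih (mid + 1) r (by omega) (by omega) (by omega) hTr
      · simp only [if_neg hfeas]
        have hTm : T ≤ mid := (hiff mid (by omega)).mp (by omega)
        exact ih l mid (by omega) h1 hlT hTm
    · rw [dif_neg hlr]
      omega

-- ===== VERDICT (by name: the statement is the Claim_ definition above) =====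
theorem solution_spec : Claim_equal_solution := by
  intro A _ hpre
  unfold Spec_solution
  have hSne : PySem.List.sorted A (fun x => x) false ≠ [] := by
    simpa [PySem.List.sorted_eq_nil_iff] using hpre
  obtain ⟨a0, t, hS⟩ : ∃ a0 t, PySem.List.sorted A (fun x => x) false = a0 :: t := by
    cases h : PySem.List.sorted A (fun x => x) false with
    | nil => exact absurd h hSne
    | cons a t => exact ⟨a, t, rfl⟩
  have hp : (a0 :: t).Pairwise (· ≤ ·) := by
    have h := PySem.List.sorted_pairwise A (fun x => x)
    rw [hS] at h
    exact h
  have h0 : (PySem.List.pyGet? (a0 :: t) 0).getD 0 = a0 := by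
    rw [PySem.List.pyGet?_zero_cons, Option.getD_some]
  have hlast : (PySem.List.pyGet? (a0 :: t) (-1)).getD 0
      = (a0 :: t).getD ((a0 :: t).length - 1) 0 := by
    rw [PySem.List.pyGet?_neg_one, List.getLast?_eq_some_getLast (by simp), Option.getD_some,
        List.getLast_eq_getElem, List.getD_eq_getElem _ 0 (by simp)]
    rfl
  have hsolA : solution A = bsearchA t a0 1
      ((a0 :: t).getD ((a0 :: t).length - 1) 0 - a0) := by
    unfold solution
    rw [hS]
    show bsearchA ((a0 :: t).drop 1) ((PySem.List.pyGet? (a0 :: t) 0).getD 0) 1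
        ((PySem.List.pyGet? (a0 :: t) (-1)).getD 0 - (PySem.List.pyGet? (a0 :: t) 0).getD 0)
      = _
    rw [h0, hlast, List.drop_one, List.tail_cons]
  have hsolB : solution_alt A =
      (if ((a0 :: t).length : Int) = 1 then 1 else
        max 1 ((PySem.List.min? ((PySem.List.pyRange 0 (((a0 :: t).length : Int) - 1) 1).map
          (fun i =>
            max ((PySem.List.pyGet? (a0 :: t) i).getD 0 -
                  (PySem.List.pyGet? (a0 :: t) 0).getD 0)
                ((PySem.List.pyGet? (a0 :: t) (((a0 :: t).length : Int) - 1)).getD 0 -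
                  (PySem.List.pyGet? (a0 :: t) (i + 1)).getD 0)))
          (fun x => x)).getD 0)) := by
    unfold solution_alt
    rw [hS]
    rfl
  rw [hsolA, hsolB]
  by_cases ht : t = []
  · subst ht
    rw [if_pos (by simp)]
    rw [show ((a0 :: ([] : List Int)).getD ((a0 :: ([] : List Int)).length - 1) 0) = a0 from rfl]
    rw [bsearchA, dif_neg (by omega)]
  · have htlen : 1 ≤ t.length := List.length_pos_iff.mpr ht
    have hlen2 : 2 ≤ (a0 :: t).length := by simp only [List.length_cons]; omega
    rw [if_neg (by simp only [List.length_cons]; omega)]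
    obtain ⟨m, hm⟩ : ∃ m, PySem.List.min?
        ((PySem.List.pyRange 0 (((a0 :: t).length : Int) - 1) 1).map
          (fun i =>
            max ((PySem.List.pyGet? (a0 :: t) i).getD 0 -
                  (PySem.List.pyGet? (a0 :: t) 0).getD 0)
                ((PySem.List.pyGet? (a0 :: t) (((a0 :: t).length : Int) - 1)).getD 0 -
                  (PySem.List.pyGet? (a0 :: t) (i + 1)).getD 0)))
        (fun x => x) = some m := by
      cases hmm : PySem.List.min?
        ((PySem.List.pyRange 0 (((a0 :: t).length : Int) - 1) 1).map
          (fun i =>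
            max ((PySem.List.pyGet? (a0 :: t) i).getD 0 -
                  (PySem.List.pyGet? (a0 :: t) 0).getD 0)
                ((PySem.List.pyGet? (a0 :: t) (((a0 :: t).length : Int) - 1)).getD 0 -
                  (PySem.List.pyGet? (a0 :: t) (i + 1)).getD 0)))
        (fun x => x) with
      | none =>
        rw [PySem.List.min?_eq_none_iff] at hmm
        have := congrArg List.length hmm
        rw [List.length_map, PySem.List.length_pyRange_one] at this
        simp only [List.length_cons, List.length_nil] at this
        omega
      | some m => exact ⟨m, rfl⟩
    rw [hm, Option.getD_some]
    have hmem := (mem_valsList hlen2).mp (PySem.List.min?_mem hm)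
    obtain ⟨k0, hk0, hmval⟩ := hmem
    have hmin := PySem.List.min?_isMin hm
    have hiff : ∀ mid, 1 ≤ mid → (innerA mid t a0 1 ≤ 2 ↔ max 1 m ≤ mid) := by
      intro mid h1
      rw [feas_iff_splitOK a0 mid t hp ht (by omega)]
      constructor
      · rintro ⟨k, hk, hval⟩
        have hmem' := (mem_valsList hlen2).mpr ⟨k, hk, rfl⟩
        have := hmin _ hmem'
        omega
      · intro hTm
        exact ⟨k0, hk0, by omega⟩
    have hr0 : a0 ≤ (a0 :: t).getD ((a0 :: t).length - 1) 0 := by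
      have := sorted_getD_mono hp (p := 0) (q := (a0 :: t).length - 1) (by omega)
        (by simp only [List.length_cons]; omega)
      rwa [List.getD_cons_zero] at this
    have hmr : m ≤ (a0 :: t).getD ((a0 :: t).length - 1) 0 - a0 := by
      have e1 : (a0 :: t).getD k0 0 ≤ (a0 :: t).getD ((a0 :: t).length - 1) 0 :=
        sorted_getD_mono hp (by simp only [List.length_cons] at hk0 ⊢; omega)
          (by simp only [List.length_cons]; omega)
      have e2 : (a0 :: t).getD 0 0 ≤ (a0 :: t).getD (k0 + 1) 0 :=
        sorted_getD_mono hp (by omega) (by omega)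
      rw [List.getD_cons_zero] at e2
      unfold valAt at hmval
      rw [List.getD_cons_zero] at hmval
      omega
    by_cases hr2 : (a0 :: t).getD ((a0 :: t).length - 1) 0 - a0 < 2
    · rw [bsearchA, dif_neg (by omega)]
      omega
    · exact bsearch_conv t a0 (max 1 m) hiff
        (((a0 :: t).getD ((a0 :: t).length - 1) 0 - a0) - 1).toNat 1 _
        (le_refl _) (le_refl _) (by omega) (by omega)
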